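-- pv_equiv track=rewrite | github.com/sleep-bug/experi_py | src/z_order_inverse.py | z_order_inverse
-- ===== SOURCE A (Python) =====
-- def z_order_inverse(p):
--
--     bin_x = bin(p)[2:]
--     if len(bin_x) % 2 != 0:
--         bin_x = '0' + bin_x
--
--     part1 = ''.join(bin_x[i] for i in range(0, len(bin_x), 2))  # Even indices
--     part2 = ''.join(bin_x[i] for i in range(1, len(bin_x), 2))  # Odd indices
--
--     num1 = int(part1, 2)
--     num2 = int(part2, 2)
--
--     return (num1, num2)
-- ===== SOURCE B (Python) =====
-- def z_order_inverse(p):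
--     num1 = 0
--     num2 = 0
--     for i in range(p.bit_length()):
--         bit = (p >> i) % 2
--         if i % 2 == 0:
--             num2 += bit << (i // 2)
--         else:
--             num1 += bit << (i // 2)
--     return (num1, num2)
-- ===== Notes on version B (the rewrite author's own statement) =====
-- stated objective: alternative
-- what changed: Replaces building a binary string, padding it and slicing even/odd character positions with a single pass of integer bit arithmetic that accumulates each bit of p directly into the right output number.
import Mathlib
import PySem

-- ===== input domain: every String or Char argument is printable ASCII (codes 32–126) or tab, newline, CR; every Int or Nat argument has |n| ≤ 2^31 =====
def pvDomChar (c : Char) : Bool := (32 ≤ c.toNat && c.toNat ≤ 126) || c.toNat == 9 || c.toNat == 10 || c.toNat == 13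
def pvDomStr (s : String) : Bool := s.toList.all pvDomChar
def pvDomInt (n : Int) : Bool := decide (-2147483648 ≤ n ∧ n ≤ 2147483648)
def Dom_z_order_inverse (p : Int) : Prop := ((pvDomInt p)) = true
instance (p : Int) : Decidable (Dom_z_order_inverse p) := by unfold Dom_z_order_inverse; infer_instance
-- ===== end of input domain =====

-- B replaces A's binary-string building, padding and even/odd character slicing with a
-- single integer bit-arithmetic pass (alternative algorithm, similar cost).


-- ===== PORT A =====
-- bin(n)[2:] for positive n (most significant digit first); the zero case is handled in paddedA.
def binDigitsA (n : Nat) : List Char :=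
  if h : n = 0 then []
  else binDigitsA (n / 2) ++ [if n % 2 = 1 then '1' else '0']
decreasing_by exact Nat.div_lt_self (Nat.pos_of_ne_zero h) (by norm_num)

-- bin_x after the odd-length '0' padding of A.
def paddedA (n : Nat) : List Char :=
  let b := if n = 0 then ['0'] else binDigitsA n
  if b.length % 2 ≠ 0 then '0' :: b else b

-- ''.join(bin_x[i] for i in range(0, len, 2)) — characters at even indices
mutual
def evensA : List Char → List Char
  | [] => []
  | c :: l => c :: oddsA l
-- characters at odd indices
def oddsA : List Char → List Char
  | [] => []
  | _ :: l => evensA l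
end

-- int(s, 2)
def val2 (l : List Char) : Int :=
  l.foldl (fun a c => 2 * a + (if c = '1' then 1 else 0)) 0

-- Port of A.  For p < 0 Python's int(part,2) raises ValueError (bin(p)[2:] = 'b…'),
-- excluded by Pre_; there this port harmlessly reads p.toNat.
def z_order_inverse (p : Int) : Int × Int :=
  let bin_x := paddedA p.toNat
  let part1 := evensA bin_x
  let part2 := oddsA bin_x
  (val2 part1, val2 part2)

-- ===== PORT B =====
-- Python's p >> i is floor division by 2^i and (…) % 2 is PySem.Int.mod, exact for all ints.
def z_order_inverse_alt (p : Int) : Int × Int :=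
  (List.range (PySem.Int.bitLength p)).foldl
    (fun nm i =>
      let bit : Int := PySem.Int.mod (PySem.Int.floordiv p ((2:Int) ^ i)) 2
      if i % 2 = 0 then (nm.1, nm.2 + bit * (2:Int) ^ (i / 2))
      else (nm.1 + bit * (2:Int) ^ (i / 2), nm.2))
    ((0:Int), (0:Int))

-- ===== PRECONDITION & SPEC =====
-- For p < 0, bin(p)[2:] starts with 'b', so A raises ValueError at int(part1, 2).
def Pre_z_order_inverse (p : Int) : Prop := 0 ≤ p
instance (p : Int) : Decidable (Pre_z_order_inverse p) := by unfold Pre_z_order_inverse; infer_instance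
def pvWitness_z_order_inverse : Int := 13

def Spec_z_order_inverse (p : Int) (out : Int × Int) : Prop := out = z_order_inverse_alt p
instance (p : Int) (out : Int × Int) : Decidable (Spec_z_order_inverse p out) := by unfold Spec_z_order_inverse; infer_instance

-- ===== CLAIM (what is proved, stated in full; the proofs are below) =====
def Claim_equal_z_order_inverse : Prop := ∀ (p : Int), Dom_z_order_inverse p → Pre_z_order_inverse p → Spec_z_order_inverse p (z_order_inverse p)

-- ===== LEMMAS AND PROOFS =====

-- the two deinterleaved values, by recursion on n over its low two bits
def Opart (n : Nat) : Int :=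
  if h : n = 0 then 0 else ((n / 2 % 2 : Nat) : Int) + 2 * Opart (n / 4)
decreasing_by exact Nat.div_lt_self (Nat.pos_of_ne_zero h) (by norm_num)

def Epart (n : Nat) : Int :=
  if h : n = 0 then 0 else ((n % 2 : Nat) : Int) + 2 * Epart (n / 4)
decreasing_by exact Nat.div_lt_self (Nat.pos_of_ne_zero h) (by norm_num)

theorem Opart_eq (n : Nat) (h : n ≠ 0) :
    Opart n = ((n / 2 % 2 : Nat) : Int) + 2 * Opart (n / 4) := by
  rw [Opart, dif_neg h]

theorem Epart_eq (n : Nat) (h : n ≠ 0) :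
    Epart n = ((n % 2 : Nat) : Int) + 2 * Epart (n / 4) := by
  rw [Epart, dif_neg h]

theorem Opart_vals : Opart 0 = 0 ∧ Opart 1 = 0 ∧ Opart 2 = 1 ∧ Opart 3 = 1 := by
  have h0 : Opart 0 = 0 := by rw [Opart]; norm_num
  refine ⟨h0, ?_, ?_, ?_⟩ <;> rw [Opart_eq _ (by norm_num)] <;> norm_num [h0]

theorem Epart_vals : Epart 0 = 0 ∧ Epart 1 = 1 ∧ Epart 2 = 0 ∧ Epart 3 = 1 := by
  have h0 : Epart 0 = 0 := by rw [Epart]; norm_num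
  refine ⟨h0, ?_, ?_, ?_⟩ <;> rw [Epart_eq _ (by norm_num)] <;> norm_num [h0]

def dig (m : Nat) : Char := if m = 1 then '1' else '0'

theorem binDigitsA_two (n : Nat) (h : 2 ≤ n) :
    binDigitsA n = binDigitsA (n / 4) ++ [dig (n / 2 % 2), dig (n % 2)] := by
  rw [binDigitsA, dif_neg (by omega), binDigitsA, dif_neg (by omega : ¬ n / 2 = 0)]
  rw [Nat.div_div_eq_div_mul]
  simp [dig]

theorem padded_step (n : Nat) :
    paddedA n = (if 4 ≤ n then paddedA (n / 4) else []) ++ [dig (n / 2 % 2), dig (n % 2)] := by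
  by_cases h4 : 4 ≤ n
  · rw [if_pos h4]
    have h1 : ¬ n = 0 := by omega
    have h2 : ¬ n / 4 = 0 := by omega
    unfold paddedA
    rw [if_neg h1, if_neg h2, binDigitsA_two n (by omega)]
    simp only [List.length_append, List.length_cons, List.length_nil]
    split_ifs <;> first
      | (exfalso; omega)
      | simp
  · rw [if_neg h4]
    interval_cases n <;> simp [paddedA, binDigitsA, dig]

theorem padded_even (n : Nat) : (paddedA n).length % 2 = 0 := by
  induction n using Nat.strong_induction_on with
  | _ n ih =>
    rw [padded_step]
    by_cases h4 : 4 ≤ n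
    · rw [if_pos h4]
      have := ih (n / 4) (by omega)
      simp [List.length_append]; omega
    · rw [if_neg h4]; simp

theorem evodd_append : ∀ (l : List Char), l.length % 2 = 0 → ∀ a b : Char,
    evensA (l ++ [a, b]) = evensA l ++ [a] ∧ oddsA (l ++ [a, b]) = oddsA l ++ [b]
  | [], _, a, b => by simp [evensA, oddsA]
  | [x], h, a, b => by simp at h
  | x :: y :: l, h, a, b => by
    have ih := evodd_append l (by simp only [List.length_cons] at h; omega) a b
    simp [evensA, oddsA, ih.1, ih.2]

theorem val2_append (l : List Char) (c : Char) :
    val2 (l ++ [c]) = 2 * val2 l + (if c = '1' then 1 else 0) := by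
  simp [val2, List.foldl_append]

theorem dig_val (m : Nat) (h : m < 2) :
    (if dig m = '1' then (1:Int) else 0) = (m : Int) := by
  interval_cases m <;> simp [dig]

theorem lemA (n : Nat) :
    val2 (evensA (paddedA n)) = Opart n ∧ val2 (oddsA (paddedA n)) = Epart n := by
  induction n using Nat.strong_induction_on with
  | _ n ih =>
    rw [padded_step]
    by_cases h4 : 4 ≤ n
    · rw [if_pos h4]
      obtain ⟨he, ho⟩ := evodd_append (paddedA (n / 4)) (padded_even _)
        (dig (n / 2 % 2)) (dig (n % 2))
      obtain ⟨ih1, ih2⟩ := ih (n / 4) (by omega)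
      rw [he, ho, val2_append, val2_append, ih1, ih2,
        dig_val _ (Nat.mod_lt _ (by norm_num)), dig_val _ (Nat.mod_lt _ (by norm_num)),
        Opart_eq n (by omega), Epart_eq n (by omega)]
      constructor <;> ring
    · rw [if_neg h4]
      interval_cases n <;>
        simp [evensA, oddsA, val2, dig,
          Opart_vals.1, Opart_vals.2.1, Opart_vals.2.2.1, Opart_vals.2.2.2,
          Epart_vals.1, Epart_vals.2.1, Epart_vals.2.2.1, Epart_vals.2.2.2]

def S1 (n m : Nat) : Int :=
  ∑ i ∈ Finset.range m, if i % 2 = 0 then 0 else ((n / 2 ^ i % 2 : Nat) : Int) * 2 ^ (i / 2)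
def S2 (n m : Nat) : Int :=
  ∑ i ∈ Finset.range m, if i % 2 = 0 then ((n / 2 ^ i % 2 : Nat) : Int) * 2 ^ (i / 2) else 0

theorem bit_bridge (n i : Nat) :
    PySem.Int.mod (PySem.Int.floordiv ((n : Nat) : Int) ((2:Int) ^ i)) 2
      = ((n / 2 ^ i % 2 : Nat) : Int) := by
  have h1 : ((2:Int) ^ i) = (((2 ^ i : Nat) : Nat) : Int) := by push_cast; ring
  rw [h1, PySem.Int.floordiv_natCast]
  exact_mod_cast PySem.Int.mod_natCast (n / 2 ^ i) 2

theorem S1_succ (n m : Nat) :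
    S1 n (m + 1) = S1 n m + (if m % 2 = 0 then 0 else ((n / 2 ^ m % 2 : Nat) : Int) * 2 ^ (m / 2)) := by
  rw [S1, Finset.sum_range_succ, ← S1]

theorem S2_succ (n m : Nat) :
    S2 n (m + 1) = S2 n m + (if m % 2 = 0 then ((n / 2 ^ m % 2 : Nat) : Int) * 2 ^ (m / 2) else 0) := by
  rw [S2, Finset.sum_range_succ, ← S2]

theorem foldB (n : Nat) : ∀ (m : Nat) (a b : Int),
    (List.range m).foldl
      (fun nm i =>
        let bit : Int := PySem.Int.mod (PySem.Int.floordiv ((n : Nat) : Int) ((2:Int) ^ i)) 2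
        if i % 2 = 0 then (nm.1, nm.2 + bit * (2:Int) ^ (i / 2))
        else (nm.1 + bit * (2:Int) ^ (i / 2), nm.2))
      (a, b) = (a + S1 n m, b + S2 n m) := by
  intro m
  induction m with
  | zero => intro a b; simp [S1, S2]
  | succ m ih =>
    intro a b
    rw [List.range_succ, List.foldl_append, ih]
    simp only [List.foldl_cons, List.foldl_nil, bit_bridge, S1_succ, S2_succ]
    rcases Nat.mod_two_eq_zero_or_one m with h | h <;>
      simp [h, Prod.ext_iff] <;> ring

theorem bitLength_four (n : Nat) (h : 4 ≤ n) :
    PySem.Int.bitLength ((n : Nat) : Int) = PySem.Int.bitLength (((n / 4 : Nat)) : Int) + 2 := by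
  rw [PySem.Int.bitLength_natCast (by omega : 0 < n),
    PySem.Int.bitLength_natCast (by omega : 0 < n / 2),
    Nat.div_div_eq_div_mul]

theorem sum_shift2 (f : Nat → Int) (m : Nat) :
    ∑ i ∈ Finset.range (m + 2), f i = (∑ i ∈ Finset.range m, f (i + 2)) + f 1 + f 0 := by
  rw [Finset.sum_range_succ' f (m + 1), Finset.sum_range_succ' (fun i => f (i + 1)) m]

theorem lemS (n : Nat) :
    S1 n (PySem.Int.bitLength ((n : Nat) : Int)) = Opart n ∧
    S2 n (PySem.Int.bitLength ((n : Nat) : Int)) = Epart n := by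
  induction n using Nat.strong_induction_on with
  | _ n ih =>
    by_cases h4 : 4 ≤ n
    · obtain ⟨ih1, ih2⟩ := ih (n / 4) (by omega)
      rw [bitLength_four n h4]
      set m := PySem.Int.bitLength (((n / 4 : Nat)) : Int) with hm
      have hshift : ∀ i : Nat, n / 2 ^ (i + 2) = n / 4 / 2 ^ i := by
        intro i
        rw [Nat.div_div_eq_div_mul, pow_add]
        ring_nf
      have hdiv2 : ∀ i : Nat, (i + 2) / 2 = i / 2 + 1 := by intro i; omega
      have hmod2 : ∀ i : Nat, (i + 2) % 2 = i % 2 := by intro i; omega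
      constructor
      · rw [S1, sum_shift2]
        have : (∑ i ∈ Finset.range m,
            if (i + 2) % 2 = 0 then 0 else ((n / 2 ^ (i + 2) % 2 : Nat) : Int) * 2 ^ ((i + 2) / 2))
            = 2 * S1 (n / 4) m := by
          rw [S1, Finset.mul_sum]
          refine Finset.sum_congr rfl fun i _ => ?_
          rw [hshift, hdiv2, hmod2]
          split_ifs <;> ring
        rw [this, ih1]
        simp only [pow_one, pow_zero]
        norm_num
        rw [Opart_eq n (by omega)]
        push_cast
        ring
      · rw [S2, sum_shift2]
        have : (∑ i ∈ Finset.range m,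
            if (i + 2) % 2 = 0 then ((n / 2 ^ (i + 2) % 2 : Nat) : Int) * 2 ^ ((i + 2) / 2) else 0)
            = 2 * S2 (n / 4) m := by
          rw [S2, Finset.mul_sum]
          refine Finset.sum_congr rfl fun i _ => ?_
          rw [hshift, hdiv2, hmod2]
          split_ifs <;> ring
        rw [this, ih2]
        simp only [pow_zero]
        norm_num
        rw [Epart_eq n (by omega)]
        push_cast
        ring
    · interval_cases n <;>
        constructor <;>
        norm_num [S1, S2, Finset.sum_range_succ,
          Opart_vals.1, Opart_vals.2.1, Opart_vals.2.2.1, Opart_vals.2.2.2,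
          Epart_vals.1, Epart_vals.2.1, Epart_vals.2.2.1, Epart_vals.2.2.2,
          show PySem.Int.bitLength ((0:Int)) = 0 from by decide,
          show PySem.Int.bitLength ((1:Int)) = 1 from by decide,
          show PySem.Int.bitLength ((2:Int)) = 2 from by decide,
          show PySem.Int.bitLength ((3:Int)) = 2 from by decide]

-- ===== VERDICT (by name: the statement is the Claim_ definition above) =====
theorem z_order_inverse_spec : Claim_equal_z_order_inverse := by
  intro p _ hpre
  unfold Spec_z_order_inverse
  obtain ⟨n, rfl⟩ : ∃ n : Nat, p = (n : Int) := ⟨p.toNat, (Int.toNat_of_nonneg hpre).symm⟩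
  rw [z_order_inverse_alt, foldB n, z_order_inverse]
  obtain ⟨ha1, ha2⟩ := lemA n
  obtain ⟨hs1, hs2⟩ := lemS n
  simp only [Int.toNat_natCast]
  rw [ha1, ha2, hs1, hs2]
  simp
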